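-- pv_equiv track=rewrite | github.com/NVIDIA/NeMo-Aligner | nemo_aligner/experimental/grpo/experience/environments/genrm_format_checker.py | check_genrm_format
-- ===== SOURCE A (Python) =====
-- def check_genrm_format(prompt: str, response: str, num_responses: int) -> bool:
--     """Check if response format matches the genrm requirement in prompt."""
--
--     response = response.split("</think>")[-1].strip()
--
--     # Track positions to verify correct ordering
--     last_position = -1
--
--     # Check for analysis sections in correct order
--     for i in range(1, num_responses + 1):
--         begin_marker = f"[The Begin of Analysis on Response {i}]"
--         end_marker = f"[The End of Analysis on Response {i}]"
--
--         if begin_marker not in response or end_marker not in response: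
--             return False
--
--         # Check proper ordering
--         begin_pos = response.find(begin_marker)
--         end_pos = response.find(end_marker)
--
--         if begin_pos <= last_position or begin_pos >= end_pos:
--             return False
--
--         last_position = end_pos
--
--     # Check for individual scores section
--     begin_scores = "[The Begin of Individual Scores]"
--     end_scores = "[The End of Individual Scores]"
--
--     if begin_scores not in response or end_scores not in response:
--         return False
--
--     # Check proper ordering for scores section
--     begin_scores_pos = response.find(begin_scores)
--     end_scores_pos = response.find(end_scores)
--
--     if begin_scores_pos <= last_position or begin_scores_pos >= end_scores_pos:
--         return False
--
--     last_position = end_scores_pos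
--
--     # Check for ranking score if there are 2 responses
--     if num_responses == 2:
--         begin_ranking = "[The Begin of Ranking Score]"
--         end_ranking = "[The End of Ranking Score]"
--
--         if begin_ranking not in response or end_ranking not in response:
--             return False
--
--         # Check proper ordering for ranking section
--         begin_ranking_pos = response.find(begin_ranking)
--         end_ranking_pos = response.find(end_ranking)
--
--         if begin_ranking_pos <= last_position or begin_ranking_pos >= end_ranking_pos:
--             return False
--
--     return True
-- ===== SOURCE B (Python) =====
-- def check_genrm_format(prompt: str, response: str, num_responses: int) -> bool:
--     """Check if response format matches the genrm requirement in prompt."""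
--     body = response.split("</think>")[-1].strip()
--
--     # A strictly ordered layout needs one distinct position per marker, so more
--     # required markers than characters in the body can never validate.
--     count = 2 * num_responses + 2 + (2 if num_responses == 2 else 0)
--     if count > len(body):
--         return False
--
--     # Stage 1: the full ordered table of required markers.
--     markers = []
--     for i in range(1, num_responses + 1):
--         markers += [f"[The Begin of Analysis on Response {i}]",
--                     f"[The End of Analysis on Response {i}]"]
--     markers += ["[The Begin of Individual Scores]", "[The End of Individual Scores]"]
--     if num_responses == 2:
--         markers += ["[The Begin of Ranking Score]", "[The End of Ranking Score]"]
--
--     # Stage 2: table of first-occurrence positions (find = -1 when absent),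
--     # anchored below by -1 so a missing marker can never pass.
--     table = [-1] + [body.find(m) for m in markers]
--
--     # Stage 3: valid iff the table is already its own sorted set, i.e. the
--     # positions are strictly increasing (hence all markers present, in order).
--     return table == sorted(set(table))
-- ===== Notes on version B (the rewrite author's own statement) =====
-- stated objective: alternative
-- what changed: A validates with a sequential early-exit scan keeping a last_position accumulator over three hand-written begin/end blocks; B builds the whole marker table, maps it to a table of first-occurrence positions anchored by -1, and decides validity declaratively by comparing that table with its own sorted deduplication (strictly increasing iff equal), with no early returns and no position bookkeeping.
import Mathlib
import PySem

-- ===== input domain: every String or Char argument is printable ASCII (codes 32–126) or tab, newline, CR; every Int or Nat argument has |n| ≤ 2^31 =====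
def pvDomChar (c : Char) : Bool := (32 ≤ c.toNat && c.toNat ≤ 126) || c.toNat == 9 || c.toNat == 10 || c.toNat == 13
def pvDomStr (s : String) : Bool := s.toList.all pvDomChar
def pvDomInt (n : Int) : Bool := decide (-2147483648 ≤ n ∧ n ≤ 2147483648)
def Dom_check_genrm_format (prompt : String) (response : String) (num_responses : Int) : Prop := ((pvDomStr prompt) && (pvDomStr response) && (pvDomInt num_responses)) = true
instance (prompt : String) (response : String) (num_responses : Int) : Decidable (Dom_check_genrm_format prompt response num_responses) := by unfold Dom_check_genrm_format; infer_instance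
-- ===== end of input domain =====

-- B replaces A's sequential early-exit scan with last_position bookkeeping by a
-- declarative check: build the full table of first-occurrence positions (anchored
-- by -1) and compare it with its own sorted deduplication (objective: alternative).

-- marker strings (shared data, used by both ports)
def pvBM (i : Int) : String := "[The Begin of Analysis on Response " ++ PySem.Int.toStr i ++ "]"
def pvEM (i : Int) : String := "[The End of Analysis on Response " ++ PySem.Int.toStr i ++ "]"
def pvBS : String := "[The Begin of Individual Scores]"
def pvES : String := "[The End of Individual Scores]"
def pvBR : String := "[The Begin of Ranking Score]"
def pvER : String := "[The End of Ranking Score]"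

-- response.split("</think>")[-1].strip()  (split? is some since sep ≠ ""; [-1] on the
-- never-empty split result is getLastD)
def pvBody (response : String) : String :=
  PySem.Str.strip ((((PySem.Str.split? response "</think>").getD []).getLastD ""))

-- ===== PORT A =====
-- one begin/end block of A (the pattern A repeats verbatim three times):
-- presence test, then 'begin_pos <= last_position or begin_pos >= end_pos'
def pvPairA (body bm em : String) (last : Int) : Option Int :=
  if (!(PySem.Str.isIn bm body) || !(PySem.Str.isIn em body)) then none
  else
    let bp := PySem.Str.find body bm
    let ep := PySem.Str.find body em
    if (bp ≤ last || bp ≥ ep) then none else some ep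

-- 'for i in range(1, num_responses + 1)' with early return False: counter recursion
-- (range is lazy in Python; none = the early 'return False')
def pvLoopA (body : String) (n : Int) (i : Int) (last : Int) : Option Int :=
  if _h : i < n + 1 then
    match pvPairA body (pvBM i) (pvEM i) last with
    | none => none
    | some ep => pvLoopA body n (i + 1) ep
  else some last
termination_by (n + 1 - i).toNat
decreasing_by omega

def check_genrm_format (prompt : String) (response : String) (num_responses : Int) : Bool :=
  match pvLoopA (pvBody response) num_responses 1 (-1) with
  | none => false
  | some last =>
    match pvPairA (pvBody response) pvBS pvES last with
    | none => false
    | some last2 =>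
      if num_responses == 2 then
        match pvPairA (pvBody response) pvBR pvER last2 with
        | none => false
        | some _ => true
      else true

-- ===== PORT B =====
-- Stage 1 of Source B: the full ordered marker table ('markers += [...]' over
-- range(1, n+1) is the flatMap, then the two fixed extensions)
def pvMarkersB (n : Int) : List String :=
  ((PySem.List.pyRange 1 (n + 1) 1).flatMap (fun i => [pvBM i, pvEM i]))
    ++ [pvBS, pvES]
    ++ (if n == 2 then [pvBR, pvER] else [])

def check_genrm_format_alt (prompt : String) (response : String) (num_responses : Int) : Bool :=
  let body := pvBody response
  -- a strictly ordered layout needs one distinct position per marker: more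
  -- required markers than characters in the body can never validate
  let count : Int := 2 * num_responses + 2 + (if num_responses == 2 then 2 else 0)
  if count > PySem.Str.len body then false
  else
    -- Stage 2: the position table, anchored below by -1
    let table : List Int := (-1) :: (pvMarkersB num_responses).map (fun m => PySem.Str.find body m)
    -- Stage 3: table == sorted(set(table))
    decide (table = PySem.List.sorted (PySem.Set.ofList table) (fun x => x) false)

-- ===== PRECONDITION & SPEC =====
def Spec_check_genrm_format (prompt : String) (response : String) (num_responses : Int) (out : Bool) : Prop := out = check_genrm_format_alt prompt response num_responses
instance (prompt : String) (response : String) (num_responses : Int) (out : Bool) : Decidable (Spec_check_genrm_format prompt response num_responses out) := by unfold Spec_check_genrm_format; infer_instance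

-- ===== CLAIM (what is proved, stated in full; the proofs are below) =====
def Claim_equal_check_genrm_format : Prop := ∀ (prompt : String) (response : String) (num_responses : Int), Dom_check_genrm_format prompt response num_responses → Spec_check_genrm_format prompt response num_responses (check_genrm_format prompt response num_responses)

-- ===== LEMMAS AND PROOFS =====

-- the strictly-increasing scan, as an explicit recursion carrying the last value
def pvChainO : Int → List Int → Option Int
  | prev, [] => some prev
  | prev, p :: ps => if p ≤ prev then none else pvChainO p ps

theorem pvChainO_append (l1 l2 : List Int) : ∀ prev,
    pvChainO prev (l1 ++ l2) = (pvChainO prev l1).bind (fun x => pvChainO x l2) := by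
  induction l1 with
  | nil => intro prev; rfl
  | cons p ps ih =>
    intro prev
    simp only [List.cons_append, pvChainO]
    by_cases h : p ≤ prev
    · simp [h]
    · simp only [if_neg h]; exact ih p

theorem pvChainO_isSome (l : List Int) : ∀ prev,
    (pvChainO prev l).isSome = true ↔ (prev :: l).Pairwise (· < ·) := by
  induction l with
  | nil => intro prev; simp [pvChainO]
  | cons p ps ih =>
    intro prev
    simp only [pvChainO]
    by_cases h : p ≤ prev
    · rw [if_pos h]
      simp only [Option.isSome_none, Bool.false_eq_true, false_iff]
      intro hp
      have := (List.pairwise_cons.mp hp).1 p (by simp)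
      omega
    · rw [if_neg h, ih p]
      constructor
      · intro hp
        refine List.pairwise_cons.mpr ⟨?_, hp⟩
        intro x hx
        rcases List.mem_cons.mp hx with hx | hx
        · omega
        · have := (List.pairwise_cons.mp hp).1 x hx
          omega
      · intro hp
        exact (List.pairwise_cons.mp hp).2

theorem pvChainO_some_ge (l : List Int) : ∀ prev x, -1 ≤ prev →
    pvChainO prev l = some x → -1 ≤ x := by
  induction l with
  | nil => intro prev x h hx; cases hx; exact h
  | cons p ps ih =>
    intro prev x h hx
    simp only [pvChainO] at hx
    by_cases hp : p ≤ prev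
    · simp [hp] at hx
    · rw [if_neg hp] at hx; exact ih p x (by omega) hx

-- A's begin/end block is two steps of the strictly-increasing scan, given prev ≥ -1
-- (absence folds into find ≤ prev because find = -1 exactly when absent).
theorem pvPairA_sem (body bm em : String) (last : Int) (h : -1 ≤ last) :
    pvPairA body bm em last =
      pvChainO last [PySem.Str.find body bm, PySem.Str.find body em] := by
  have hbm := PySem.Chars.neg_one_le_find body.toList bm.toList
  have hem := PySem.Chars.neg_one_le_find body.toList em.toList
  unfold pvPairA
  simp only [pvChainO]
  by_cases h1 : PySem.Chars.isIn bm.toList body.toList = true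
  · by_cases h2 : PySem.Chars.isIn em.toList body.toList = true
    · have hb : 0 ≤ PySem.Chars.find body.toList bm.toList :=
        (PySem.Chars.find_nonneg_iff _ _).mpr ((PySem.Chars.isIn_iff_infix _ _).mp h1)
      have he : 0 ≤ PySem.Chars.find body.toList em.toList :=
        (PySem.Chars.find_nonneg_iff _ _).mpr ((PySem.Chars.isIn_iff_infix _ _).mp h2)
      simp only [PySem.Str.isIn_eq, PySem.Str.find_eq, h1, h2]
      split_ifs <;> simp_all
    · have he : PySem.Chars.find body.toList em.toList = -1 :=
        (PySem.Chars.find_eq_neg_one_iff _ _).mpr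
          (fun hc => h2 ((PySem.Chars.isIn_iff_infix _ _).mpr hc))
      simp only [PySem.Str.isIn_eq, PySem.Str.find_eq, h1, eq_false_of_ne_true h2]
      split_ifs <;> simp_all
  · have hb : PySem.Chars.find body.toList bm.toList = -1 :=
      (PySem.Chars.find_eq_neg_one_iff _ _).mpr
        (fun hc => h1 ((PySem.Chars.isIn_iff_infix _ _).mpr hc))
    simp only [PySem.Str.isIn_eq, PySem.Str.find_eq, eq_false_of_ne_true h1]
    split_ifs <;> simp_all

-- A's analysis loop is the scan over the analysis slice of the position table
theorem pvLoopA_eq_chainO (body : String) (n : Int) :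
    ∀ (fuel : Nat) (i last : Int), (n + 1 - i).toNat = fuel → -1 ≤ last →
      pvLoopA body n i last =
        pvChainO last (((PySem.List.pyRange i (n + 1) 1).flatMap
          (fun j => [pvBM j, pvEM j])).map (fun m => PySem.Str.find body m)) := by
  intro fuel
  induction fuel with
  | zero =>
    intro i last hf h
    rw [pvLoopA]
    have hni : ¬ i < n + 1 := by omega
    rw [dif_neg hni]
    rw [PySem.List.pyRange_one]
    have : (n + 1 - i).toNat = 0 := hf
    simp [this, pvChainO]
  | succ m ih =>
    intro i last hf h
    rw [pvLoopA]
    by_cases hi : i < n + 1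
    · rw [dif_pos hi]
      rw [PySem.List.pyRange_one_cons hi]
      simp only [List.flatMap_cons, List.map_append, List.map_cons, List.map_nil]
      rw [List.cons_append, List.cons_append, List.nil_append]
      rw [pvPairA_sem body _ _ last h]
      simp only [pvChainO, PySem.Str.find_eq]
      by_cases h1 : PySem.Chars.find body.toList (pvBM i).toList ≤ last
      · rw [if_pos h1, if_pos h1]
      · rw [if_neg h1, if_neg h1]
        by_cases h2 : PySem.Chars.find body.toList (pvEM i).toList ≤ PySem.Chars.find body.toList (pvBM i).toList
        · rw [if_pos h2, if_pos h2]
        · rw [if_neg h2, if_neg h2]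
          have hge : -1 ≤ PySem.Chars.find body.toList (pvEM i).toList :=
            PySem.Chars.neg_one_le_find body.toList (pvEM i).toList
          have hrec := ih (i + 1) (PySem.Chars.find body.toList (pvEM i).toList) (by omega) hge
          simp only [PySem.Str.find_eq] at hrec
          exact hrec
    · rw [dif_neg hi]
      rw [PySem.List.pyRange_one]
      have : (n + 1 - i).toNat = 0 := by omega
      simp [this, pvChainO]

-- A computes exactly 'the whole position table is a strict chain above -1'
theorem pvA_eq_chain (response : String) (n : Int) :
    check_genrm_format "" response n =
      (pvChainO (-1) ((pvMarkersB n).map (fun m => PySem.Str.find (pvBody response) m))).isSome := by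
  unfold check_genrm_format pvMarkersB
  rw [pvLoopA_eq_chainO (pvBody response) n _ 1 (-1) rfl (by omega)]
  simp only [List.map_append, pvChainO_append]
  cases hs : pvChainO (-1)
      (((PySem.List.pyRange 1 (n + 1) 1).flatMap (fun j => [pvBM j, pvEM j])).map
        (fun m => PySem.Str.find (pvBody response) m)) with
  | none => rfl
  | some last =>
    have hlast : -1 ≤ last := pvChainO_some_ge _ _ _ (by omega) hs
    simp only [Option.bind_some]
    rw [show ([pvBS, pvES].map (fun m => PySem.Str.find (pvBody response) m)) =
        [PySem.Str.find (pvBody response) pvBS, PySem.Str.find (pvBody response) pvES] from rfl,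
      ← pvPairA_sem _ _ _ _ hlast]
    cases hp : pvPairA (pvBody response) pvBS pvES last with
    | none => rfl
    | some last2 =>
      have hl2 : -1 ≤ last2 := by
        rw [pvPairA_sem _ _ _ _ hlast] at hp
        exact pvChainO_some_ge _ _ _ hlast hp
      simp only [Option.bind_some]
      by_cases hn : (n == 2) = true
      · rw [if_pos hn, if_pos hn]
        rw [show ([pvBR, pvER].map (fun m => PySem.Str.find (pvBody response) m)) =
            [PySem.Str.find (pvBody response) pvBR, PySem.Str.find (pvBody response) pvER] from rfl,
          ← pvPairA_sem _ _ _ _ hl2]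
        cases pvPairA (pvBody response) pvBR pvER last2 <;> rfl
      · rw [if_neg hn, if_neg hn]; rfl

-- B's sorted-set comparison characterises strict increase
theorem pvTable_sorted_iff (l : List Int) :
    (l = PySem.List.sorted (PySem.Set.ofList l) (fun x => x) false) ↔ l.Pairwise (· < ·) := by
  constructor
  · intro h; rw [h]; exact PySem.List.sorted_ofList_pairwise_lt l
  · intro h
    have hn : l.Nodup := h.imp (fun hab => ne_of_lt hab)
    rw [PySem.Set.ofList_eq_self_of_nodup l hn]
    exact (PySem.List.sorted_eq_of_perm_of_pairwise_lt l l (fun x => x) (List.Perm.refl l) h).symm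

-- neither program reads the prompt
theorem pvA_prompt_irrel (p q response : String) (n : Int) :
    check_genrm_format p response n = check_genrm_format q response n := rfl


-- a strictly increasing integer list starting at a is bounded below M by its length
theorem pvPairwise_len_bound : ∀ (t : List Int) (a M : Int),
    (a :: t).Pairwise (· < ·) → (∀ x ∈ a :: t, x ≤ M) → a + t.length ≤ M := by
  intro t
  induction t with
  | nil => intro a M _ hb; simpa using hb a (by simp)
  | cons b t' ih =>
    intro a M hp hb
    have hab : a < b := (List.pairwise_cons.mp hp).1 b (by simp)
    have hp' : (b :: t').Pairwise (· < ·) := (List.pairwise_cons.mp hp).2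
    have hb' : ∀ x ∈ b :: t', x ≤ M := fun x hx => hb x (List.mem_cons_of_mem a hx)
    have := ih b M hp' hb'
    simp only [List.length_cons]
    omega

-- a nonempty needle is found strictly inside the haystack (or is absent, -1)
theorem pvFind_lt_len (s sub : List Char) (hsub : sub ≠ []) :
    PySem.Chars.find s sub ≤ (s.length : Int) - 1 := by
  by_cases h : PySem.Chars.find s sub = -1
  · rw [h]
    have : (0 : Int) ≤ (s.length : Int) := Int.natCast_nonneg _
    omega
  · have h0 : 0 ≤ PySem.Chars.find s sub := by
      have := PySem.Chars.neg_one_le_find s sub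
      omega
    have hspec := (PySem.Chars.find_spec h0).1
    have hlen : sub.length ≤ (List.drop (PySem.Chars.find s sub).toNat s).length :=
      hspec.length_le
    have hsl : 1 ≤ sub.length := by
      cases sub with
      | nil => exact absurd rfl hsub
      | cons _ _ => simp
    rw [List.length_drop] at hlen
    omega

-- every required marker is a nonempty string
theorem pvMarkers_ne_nil (n : Int) : ∀ m ∈ pvMarkersB n, m.toList ≠ [] := by
  intro m hm
  unfold pvMarkersB at hm
  simp only [List.mem_append, List.mem_flatMap, List.mem_cons, List.not_mem_nil,
    or_false] at hm
  have hBM : ∀ i : Int, (pvBM i).toList ≠ [] := by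
    intro i
    unfold pvBM
    rw [String.toList_append, String.toList_append]
    simp
  have hEM : ∀ i : Int, (pvEM i).toList ≠ [] := by
    intro i
    unfold pvEM
    rw [String.toList_append, String.toList_append]
    simp
  rcases hm with (⟨i, _, hm | hm⟩ | hm | hm) | hm
  · subst hm; exact hBM i
  · subst hm; exact hEM i
  · subst hm; decide
  · subst hm; decide
  · split at hm
    · simp only [List.mem_cons, List.not_mem_nil, or_false] at hm
      rcases hm with hm | hm <;> (subst hm; decide)
    · cases hm

-- the size of the marker table (for 0 ≤ n)
theorem pvMarkers_length (n : Int) (hn : 0 ≤ n) :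
    ((pvMarkersB n).length : Int) = 2 * n + 2 + (if n == 2 then 2 else 0) := by
  unfold pvMarkersB
  have h2 : ∀ l : List Int, (l.flatMap (fun i => [pvBM i, pvEM i])).length = 2 * l.length := by
    intro l
    induction l with
    | nil => rfl
    | cons x xs ih => simp [List.flatMap_cons, ih]; omega
  simp only [List.length_append, h2, PySem.List.length_pyRange_one, List.length_cons,
    List.length_nil]
  have : ((n + 1 - 1).toNat : Int) = n := by omega
  split <;> simp only [List.length_cons, List.length_nil] <;> push_cast <;> omega

-- when the guard fires, A is false too: the chain cannot fit into the body
theorem pvGuard_false (response : String) (n : Int)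
    (hg : 2 * n + 2 + (if n == 2 then 2 else 0) > PySem.Str.len (pvBody response)) :
    check_genrm_format "" response n = false := by
  have hlen0 : (0 : Int) ≤ PySem.Str.len (pvBody response) := by
    simp only [PySem.Str.len_eq]
    exact Int.natCast_nonneg _
  have hn : 0 ≤ n := by
    by_contra hneg
    have : (if n == 2 then (2:Int) else 0) = 0 := by
      have : (n == 2) = false := by simp; omega
      simp [this]
    omega
  rw [pvA_eq_chain]
  set finds := (pvMarkersB n).map (fun m => PySem.Str.find (pvBody response) m) with hfinds
  have hbound : ∀ x ∈ (-1 : Int) :: finds, x ≤ PySem.Str.len (pvBody response) - 1 := by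
    intro x hx
    rcases List.mem_cons.mp hx with hx | hx
    · omega
    · rw [hfinds] at hx
      rcases List.mem_map.mp hx with ⟨m, hm, hfx⟩
      have := pvFind_lt_len (pvBody response).toList m.toList (pvMarkers_ne_nil n m hm)
      rw [← hfx]
      simp only [PySem.Str.find_eq, PySem.Str.len_eq]
      exact this
  have hnp : ¬ (((-1 : Int) :: finds).Pairwise (· < ·)) := by
    intro hp
    have := pvPairwise_len_bound finds (-1) (PySem.Str.len (pvBody response) - 1) hp hbound
    have hlenf : (finds.length : Int) = 2 * n + 2 + (if n == 2 then 2 else 0) := by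
      rw [hfinds, List.length_map]
      exact pvMarkers_length n hn
    omega
  cases hv : (pvChainO (-1) finds).isSome with
  | false => rfl
  | true => exact absurd ((pvChainO_isSome finds (-1)).mp hv) hnp

-- ===== VERDICT (by name: the statement is the Claim_ definition above) =====
theorem check_genrm_format_spec : Claim_equal_check_genrm_format := by
  intro prompt response num_responses _
  unfold Spec_check_genrm_format
  rw [pvA_prompt_irrel prompt "" response num_responses]
  have hB : check_genrm_format_alt prompt response num_responses =
      (if 2 * num_responses + 2 + (if num_responses == 2 then 2 else 0) >
            PySem.Str.len (pvBody response) then false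
       else decide ((((-1 : Int) :: (pvMarkersB num_responses).map
          (fun m => PySem.Str.find (pvBody response) m))) =
        PySem.List.sorted
          (PySem.Set.ofList ((-1 : Int) :: (pvMarkersB num_responses).map
            (fun m => PySem.Str.find (pvBody response) m))) (fun x => x) false)) := rfl
  rw [hB]
  by_cases hg : 2 * num_responses + 2 + (if num_responses == 2 then 2 else 0) >
      PySem.Str.len (pvBody response)
  · rw [if_pos hg, pvGuard_false response num_responses hg]
  · rw [if_neg hg, pvA_eq_chain, Bool.eq_iff_iff, decide_eq_true_iff, pvChainO_isSome]
    exact (pvTable_sorted_iff _).symm
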